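-- pv_equiv track=rewrite | github.com/Jules-Boogie/controllingProgramFlow | Skip/func.py | skip
-- ===== SOURCE A (Python) =====
-- def skip(s,n): #while-loop
--     """
--     Returns a copy of s, only including positions that are multiples of n
--
--     A position is a multiple of n if pos % n == 0.
--
--     Examples:
--         skip('hello world',1) returns 'hello world'
--         skip('hello world',2) returns 'hlowrd'
--         skip('hello world',3) returns 'hlwl'
--         skip('hello world',4) returns 'hor'
--
--     Parameter s: the string to copy
--     Precondition: s is a nonempty string
--
--     Parameter n: the letter positions to accept
--     Precondition: n is an int > 0
--     """
--     # You must use a while-loop, not a for-loop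
--     l = len(s)
--     start = 0
--     res = ""
--     while start < l:
--         if start % n == 0:
--             res = res + s[start]
--         start = start + 1
--     return res
-- ===== SOURCE B (Python) =====
-- def skip(s, n):
--     # Build the result back-to-front: start at the largest multiple of abs(n)
--     # below len(s) and walk DOWN, prepending each accepted character.
--     k = abs(n)
--     i = ((len(s) - 1) // k) * k
--     res = ""
--     while i >= 0:
--         res = s[i] + res
--         i = i - k
--     return res
-- ===== Notes on version B (the rewrite author's own statement) =====
-- stated objective: faster
-- what changed: Replaced A's forward scan of every index filtered by 'start % n == 0' with a backwards branch-free loop that starts at the largest multiple of abs(n) below len(s) (computed by floor division) and walks down by abs(n), prepending each accepted character.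
-- outside the precondition, e.g. on skip('', 0): A returns '', B raises ZeroDivisionError
import Mathlib
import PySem

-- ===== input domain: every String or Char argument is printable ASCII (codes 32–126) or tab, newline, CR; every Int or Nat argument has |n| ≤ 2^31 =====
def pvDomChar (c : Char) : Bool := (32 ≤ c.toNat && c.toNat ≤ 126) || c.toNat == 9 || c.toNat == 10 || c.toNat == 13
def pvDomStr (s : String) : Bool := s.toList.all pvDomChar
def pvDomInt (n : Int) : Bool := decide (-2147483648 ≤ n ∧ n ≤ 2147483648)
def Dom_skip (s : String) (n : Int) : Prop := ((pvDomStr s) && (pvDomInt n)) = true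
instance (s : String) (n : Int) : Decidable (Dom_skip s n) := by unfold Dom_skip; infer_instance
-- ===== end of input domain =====

-- B replaces A's forward scan-every-index-and-test-modulo loop by a backwards loop that
-- starts at the largest multiple of |n| below len(s) (via floor division) and walks down
-- by |n|, prepending; equivalence of return values proved on Pre_ (n ≠ 0).


-- ===== PORT A =====
-- while start < l: if start % n == 0: res = res + s[start]; start = start + 1
def skipLoopA (s : String) (n l : Int) (start : Int) (res : List Char) : List Char :=
  if _h : start < l then
    skipLoopA s n l (start + 1)
      (if PySem.Int.mod start n = 0 then
        (match PySem.Str.pyGet? s start with  -- s[start]; always in range here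
         | some c => res ++ [c]
         | none => res)
       else res)
  else res
termination_by (l - start).toNat
decreasing_by omega

def skip (s : String) (n : Int) : String :=
  String.ofList (skipLoopA s n (PySem.Str.len s) 0 [])

-- ===== PORT B =====
-- i = ((len(s)-1)//k)*k; while i >= 0: res = s[i] + res; i = i - k
-- (fuel is a totality device only; len(s)+1 iterations always suffice when k ≥ 1)
def skipLoopB (s : String) (k : Int) (fuel : Nat) (i : Int) (res : List Char) : List Char :=
  match fuel with
  | 0 => res
  | f + 1 =>
    if 0 ≤ i then
      skipLoopB s k f (i - k)
        (match PySem.Str.pyGet? s i with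
         | some c => c :: res
         | none => res)
    else res

def skip_alt (s : String) (n : Int) : String :=
  String.ofList (skipLoopB s |n| (s.toList.length + 1)
    (PySem.Int.floordiv (PySem.Str.len s - 1) |n| * |n|) [])

-- ===== PRECONDITION & SPEC =====
-- Pre_ excludes n = 0: there Python A raises ZeroDivisionError on every nonempty s,
-- and B's floor division raises ZeroDivisionError even on s = "" (where A returns "").
def Pre_skip (s : String) (n : Int) : Prop := n ≠ 0
instance (s : String) (n : Int) : Decidable (Pre_skip s n) := by unfold Pre_skip; infer_instance
def pvWitness_skip : String × Int := ("hello world", 2)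

def Spec_skip (s : String) (n : Int) (out : String) : Prop := out = skip_alt s n
instance (s : String) (n : Int) (out : String) : Decidable (Spec_skip s n out) := by unfold Spec_skip; infer_instance

-- ===== CLAIM (what is proved, stated in full; the proofs are below) =====
def Claim_equal_skip : Prop := ∀ (s : String) (n : Int), Dom_skip s n → Pre_skip s n → Spec_skip s n (skip s n)

-- ===== LEMMAS AND PROOFS =====

theorem skipLoopA_ge (s : String) (n l start : Int) (res : List Char) (h : l ≤ start) :
    skipLoopA s n l start res = res := by
  unfold skipLoopA
  simp [show ¬ start < l by omega]

-- A's scan does nothing while it passes over non-multiple positions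
theorem skipLoopA_pass (s : String) (n l : Int) (m : Nat) :
    ∀ (start : Int) (res : List Char),
    (∀ j : Int, start ≤ j → j < start + m → PySem.Int.mod j n ≠ 0) →
    skipLoopA s n l start res = skipLoopA s n l (start + m) res := by
  induction m with
  | zero => intro start res _; simp
  | succ m ih =>
    intro start res hno
    by_cases h : start < l
    · rw [skipLoopA]
      have h0 : PySem.Int.mod start n ≠ 0 := by
        refine hno start le_rfl ?_
        push_cast; omega
      simp only [h, dif_pos, if_neg h0]
      rw [ih (start + 1) res (by intro j h1 h2; refine hno j (by omega) ?_; push_cast at h2 ⊢; omega)]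
      congr 1
      push_cast; ring
    · rw [skipLoopA_ge s n l start res (by omega),
          skipLoopA_ge s n l _ res (by push_cast; omega)]

-- A's loop from the multiple-of-k position t*k yields the characters at the
-- remaining multiple positions, in order
theorem skipLoopA_char (s : String) (n : Int) (k : Nat) (hk : (k : Int) = |n|) (hk1 : 1 ≤ k)
    (m : Nat) (hm : m = (s.toList.length + k - 1) / k) :
    ∀ (d t : Nat) (res : List Char), t + d = m →
    skipLoopA s n (s.toList.length : Int) ((t * k : Nat) : Int) res =
      res ++ (List.range d).map (fun j => s.toList.getD ((t + j) * k) ' ') := by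
  have hkpos : 0 < k := hk1
  have hdm := Nat.div_add_mod (s.toList.length + k - 1) k
  have hmod := Nat.mod_lt (s.toList.length + k - 1) hkpos
  intro d
  induction d with
  | zero =>
    intro t res ht
    have hge : s.toList.length ≤ t * k := by
      have h1 : m * k ≤ t * k := Nat.mul_le_mul_right k (by omega)
      have h2 : s.toList.length ≤ m * k := by
        have h3 : k * ((s.toList.length + k - 1) / k) = m * k := by
          rw [hm]; exact Nat.mul_comm k _
        omega
      omega
    rw [skipLoopA_ge _ _ _ _ _ (by exact_mod_cast Int.ofNat_le.mpr hge)]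
    simp
  | succ d ih =>
    intro t res ht
    have hsm : (t + 1) * k = t * k + k := Nat.succ_mul t k
    have hlt : t * k < s.toList.length := by
      have h1 : (t + 1) * k ≤ m * k := Nat.mul_le_mul_right k (by omega)
      have h2 : m * k ≤ s.toList.length + k - 1 := by
        have h3 : k * ((s.toList.length + k - 1) / k) = m * k := by
          rw [hm]; exact Nat.mul_comm k _
        omega
      omega
    rw [skipLoopA]
    have hcond : ((t * k : Nat) : Int) < (s.toList.length : Int) := by exact_mod_cast hlt
    have hmul : PySem.Int.mod ((t * k : Nat) : Int) n = 0 := by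
      rw [PySem.Int.mod_eq_zero_iff_dvd]
      refine (abs_dvd n _).mp ?_
      rw [← hk]
      exact ⟨(t : Int), by push_cast; ring⟩
    simp only [hcond, dif_pos, if_pos hmul]
    have hget : PySem.Str.pyGet? s ((t * k : Nat) : Int) = some (s.toList[t * k]'hlt) := by
      rw [PySem.Str.pyGet?_natCast]
      exact List.getElem?_eq_getElem hlt
    rw [hget]
    have hpass := skipLoopA_pass s n (s.toList.length : Int) (k - 1)
      (((t * k : Nat) : Int) + 1) (res ++ [s.toList[t * k]'hlt]) (by
        intro j h1 h2
        rw [Ne, PySem.Int.mod_eq_zero_iff_dvd]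
        intro hdj
        have hdj' : (k : Int) ∣ j := by rw [hk]; exact (abs_dvd n j).mpr hdj
        have hdt : (k : Int) ∣ ((t * k : Nat) : Int) := ⟨(t : Int), by push_cast; ring⟩
        have hr : (k : Int) ∣ (j - ((t * k : Nat) : Int)) := Int.dvd_sub hdj' hdt
        have hkle : (k : Int) ≤ j - ((t * k : Nat) : Int) := by
          refine Int.le_of_dvd ?_ hr
          omega
        have : ((k - 1 : Nat) : Int) = (k : Int) - 1 := by push_cast [hk1]; ring
        omega)
    rw [hpass]
    have harg : ((t * k : Nat) : Int) + 1 + ((k - 1 : Nat) : Int) = (((t + 1) * k : Nat) : Int) := by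
      have h4 : ((k - 1 : Nat) : Int) = (k : Int) - 1 := by push_cast [hk1]; ring
      rw [h4, hsm]
      push_cast
      ring
    rw [harg, ih (t + 1) _ (by omega)]
    rw [List.range_succ_eq_map, List.map_cons, List.map_map]
    simp only [List.append_assoc, List.singleton_append]
    congr 2
    · simp [List.getD_eq_getElem?_getD, List.getElem?_eq_getElem hlt]
    · refine List.map_congr_left fun j _ => ?_
      simp only [Function.comp_apply]
      congr 2
      omega

theorem skipLoopB_neg (s : String) (k : Int) (fuel : Nat) (i : Int) (res : List Char)
    (h : i < 0) : skipLoopB s k fuel i res = res := by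
  cases fuel with
  | zero => rfl
  | succ f => rw [skipLoopB]; simp [show ¬ 0 ≤ i by omega]

-- B's backwards loop from the multiple position t*k prepends the characters at
-- the multiples 0, k, …, t*k
theorem skipLoopB_char (s : String) (n : Int) (k : Nat) (hk : (k : Int) = |n|) (hk1 : 1 ≤ k) :
    ∀ (t : Nat) (fuel : Nat) (res : List Char), t + 1 ≤ fuel → t * k < s.toList.length →
    skipLoopB s |n| fuel ((t * k : Nat) : Int) res =
      (List.range (t + 1)).map (fun j => s.toList.getD (j * k) ' ') ++ res := by
  intro t
  induction t with
  | zero =>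
    intro fuel res hf hlen
    cases fuel with
    | zero => omega
    | succ f =>
      have hlt : 0 < s.toList.length := by omega
      have hget : PySem.Str.pyGet? s ((0 * k : Nat) : Int) = some (s.toList[0 * k]'hlen) := by
        rw [PySem.Str.pyGet?_natCast]
        exact List.getElem?_eq_getElem hlen
      rw [skipLoopB, if_pos (Int.natCast_nonneg _), hget,
        skipLoopB_neg _ _ _ _ _ (by rw [← hk]; push_cast; omega)]
      simp [List.getD_eq_getElem?_getD, List.getElem?_eq_getElem hlt]
  | succ t ih =>
    intro fuel res hf hlen
    cases fuel with
    | zero => omega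
    | succ f =>
      have hsm : (t + 1) * k = t * k + k := Nat.succ_mul t k
      rw [skipLoopB, if_pos (Int.natCast_nonneg _)]
      have hget : PySem.Str.pyGet? s (((t + 1) * k : Nat) : Int) =
          some (s.toList[(t + 1) * k]'hlen) := by
        rw [PySem.Str.pyGet?_natCast]
        exact List.getElem?_eq_getElem hlen
      rw [hget]
      have harg : (((t + 1) * k : Nat) : Int) - |n| = ((t * k : Nat) : Int) := by
        rw [← hk, hsm]; push_cast; ring
      rw [harg, ih f _ (by omega) (by omega)]
      rw [List.range_succ, List.range_succ, List.map_append, List.map_append]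
      simp [List.getD_eq_getElem?_getD, List.getElem?_eq_getElem hlen,
        List.getElem?_eq_getElem (show t * k < s.toList.length by omega)]
      rw [List.range_succ, List.map_append]
      simp [List.getElem?_eq_getElem (show t * k < s.toList.length by omega)]

theorem skip_eq_alt (s : String) (n : Int) (hn : n ≠ 0) : skip s n = skip_alt s n := by
  have habs : 1 ≤ |n| := Int.one_le_abs hn
  obtain ⟨k, hk⟩ : ∃ k : Nat, (k : Int) = |n| := ⟨|n|.toNat, Int.toNat_of_nonneg (abs_nonneg n)⟩
  have hk1 : 1 ≤ k := by omega
  unfold skip skip_alt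
  rw [PySem.Str.len_eq]
  by_cases hL : s.toList.length = 0
  · -- empty string: A's loop never runs, B starts below 0
    rw [hL]
    rw [skipLoopA_ge _ _ _ _ _ (by omega)]
    have hfd : PySem.Int.floordiv (((0 : Nat) : Int) - 1) |n| = -1 := by
      rw [PySem.Int.floordiv_eq_iff_of_pos (by omega)]
      constructor <;> omega
    rw [hfd, skipLoopB_neg _ _ _ _ _ (by omega)]
  · have hL1 : 1 ≤ s.toList.length := by omega
    obtain ⟨t0, ht0⟩ : ∃ t : Nat, t = (s.toList.length - 1) / k := ⟨_, rfl⟩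
    have hkpos : 0 < k := hk1
    have hdm : k * t0 + (s.toList.length - 1) % k = s.toList.length - 1 := by
      rw [ht0]; exact Nat.div_add_mod _ _
    have hmod : (s.toList.length - 1) % k < k := Nat.mod_lt _ hkpos
    have hcm : k * t0 = t0 * k := Nat.mul_comm k t0
    have hsm : (t0 + 1) * k = t0 * k + k := Nat.succ_mul t0 k
    -- the starting index of B is t0 * k
    have hfd : PySem.Int.floordiv ((s.toList.length : Int) - 1) |n| = (t0 : Int) := by
      rw [PySem.Int.floordiv_eq_iff_of_pos (by omega), ← hk]
      constructor
      · have h1 : ((t0 * k : Nat) : Int) = (t0 : Int) * (k : Int) := by push_cast; ring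
        have h2 : t0 * k ≤ s.toList.length - 1 := by omega
        omega
      · have h1 : (((t0 + 1) * k : Nat) : Int) = ((t0 : Int) + 1) * (k : Int) := by push_cast; ring
        have h2 : s.toList.length - 1 < (t0 + 1) * k := by omega
        omega
    have hstart : PySem.Int.floordiv ((s.toList.length : Int) - 1) |n| * |n| =
        ((t0 * k : Nat) : Int) := by
      rw [hfd, ← hk]; push_cast; ring
    rw [hstart]
    have hm : t0 + 1 = (s.toList.length + k - 1) / k := by
      have h1 : s.toList.length + k - 1 = (s.toList.length - 1) + k := by omega
      rw [h1, Nat.add_div_right _ hkpos]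
      omega
    have hA := skipLoopA_char s n k hk hk1 (t0 + 1) hm (t0 + 1) 0 [] (by omega)
    have hB := skipLoopB_char s n k hk hk1 t0 (s.toList.length + 1) [] (by
        have := Nat.div_le_self (s.toList.length - 1) k
        omega) (by omega)
    rw [show ((0 * k : Nat) : Int) = (0 : Int) by push_cast; ring] at hA
    rw [hA, hB]
    simp

-- ===== VERDICT (by name: the statement is the Claim_ definition above) =====
theorem skip_spec : Claim_equal_skip := by
  intro s n _hdom hpre
  unfold Spec_skip
  exact skip_eq_alt s n hpre
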